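-- pv_equiv track=rewrite | github.com/um-computacion-tm/ajedrez-2024-facumangione | chess/piece.py | possible_moves_general
-- ===== SOURCE A (Python) =====
-- def possible_moves_general(fila_inicio, columna_inicio, direcciones, un_paso=False):
--     #La función devuelve los movimientos posibles de la pieza desde su posición actual.
--     movimientos = []
--     for direccion in direcciones:
--         nueva_fila, nueva_columna = fila_inicio, columna_inicio
--         while True:
--             nueva_fila += direccion[0]
--             nueva_columna += direccion[1]
--             if 0 <= nueva_fila < 8 and 0 <= nueva_columna < 8:
--                 movimientos.append((nueva_fila, nueva_columna))
--                 if un_paso: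
--                     break
--             else:
--                 break
--     return movimientos
-- ===== SOURCE B (Python) =====
-- def possible_moves_general(fila_inicio, columna_inicio, direcciones, un_paso=False):
--     # Closed-form step count per direction instead of incremental boundary probing.
--     movimientos = []
--     for dr, dc in direcciones:
--         if not (0 <= fila_inicio + dr < 8 and 0 <= columna_inicio + dc < 8):
--             continue
--         if un_paso:
--             pasos = 1
--         else:
--             cotas = []
--             if dr > 0:
--                 cotas.append((7 - fila_inicio) // dr)
--             elif dr < 0:
--                 cotas.append(fila_inicio // (-dr))
--             if dc > 0:
--                 cotas.append((7 - columna_inicio) // dc)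
--             elif dc < 0:
--                 cotas.append(columna_inicio // (-dc))
--             pasos = min(cotas)
--         movimientos.extend((fila_inicio + k * dr, columna_inicio + k * dc)
--                            for k in range(1, pasos + 1))
--     return movimientos
-- ===== Notes on version B (the rewrite author's own statement) =====
-- stated objective: alternative
-- what changed: Replaces A's incremental while-loop that probes the board square by square with a closed-form per-direction step count (floor divisions on the constrained axes, min over them, clamped to 1 for un_paso) followed by a single range comprehension.
-- outside the precondition, e.g. on possible_moves_general(3, 3, [(0, 0)], False): A does not finish within the time limit, B raises ValueError
import Mathlib
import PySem

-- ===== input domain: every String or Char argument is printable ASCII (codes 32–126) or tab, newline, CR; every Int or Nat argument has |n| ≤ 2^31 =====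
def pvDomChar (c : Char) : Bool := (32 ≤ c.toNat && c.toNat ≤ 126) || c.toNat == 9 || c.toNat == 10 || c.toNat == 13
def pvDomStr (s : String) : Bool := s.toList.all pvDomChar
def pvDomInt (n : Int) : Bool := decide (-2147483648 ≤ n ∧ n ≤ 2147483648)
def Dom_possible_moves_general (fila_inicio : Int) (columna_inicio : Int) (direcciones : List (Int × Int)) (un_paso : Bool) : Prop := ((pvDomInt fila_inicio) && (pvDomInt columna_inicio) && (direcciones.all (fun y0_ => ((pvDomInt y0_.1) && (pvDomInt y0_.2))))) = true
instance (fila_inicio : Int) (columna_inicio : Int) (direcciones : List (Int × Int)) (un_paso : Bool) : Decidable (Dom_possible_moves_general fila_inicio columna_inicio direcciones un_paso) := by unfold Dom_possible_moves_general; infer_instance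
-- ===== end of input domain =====

-- B replaces A's incremental boundary-probing while-loop by a closed-form step
-- count per direction (floor divisions + min) and a range comprehension; objective: alternative.


-- ===== PORT A =====
-- A's inner 'while True' loop.  On every input admitted by Pre_ the loop runs at
-- most 8 iterations before breaking, so fuel 16 never runs out there; the fuel
-- only truncates the one case (direction (0,0), in-board start, un_paso false)
-- where the Python loop never terminates, which Pre_ excludes.
def pvLoopA (dr dc : Int) (un_paso : Bool) : Int → Int → Nat → List (Int × Int)
  | _, _, 0 => []
  | r, c, fuel + 1 =>
    let r' := r + dr
    let c' := c + dc
    if 0 ≤ r' ∧ r' < 8 ∧ 0 ≤ c' ∧ c' < 8 then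
      if un_paso then [(r', c')]
      else (r', c') :: pvLoopA dr dc un_paso r' c' fuel
    else []

def possible_moves_general (fila_inicio : Int) (columna_inicio : Int) (direcciones : List (Int × Int)) (un_paso : Bool) : List (Int × Int) :=
  direcciones.foldl
    (fun movimientos direccion =>
      movimientos ++ pvLoopA direccion.1 direccion.2 un_paso fila_inicio columna_inicio 16)
    []

-- ===== PORT B =====
-- the 'cotas' list Source B builds for one axis (position x, component d)
def pvCota (x d : Int) : List Int :=
  if d > 0 then [PySem.Int.floordiv (7 - x) d]
  else if d < 0 then [PySem.Int.floordiv x (-d)]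
  else []

-- min(cotas); Source B's min([]) raises ValueError — reachable only outside Pre_, 0 here
def pvCotasMin (fila col dr dc : Int) : Int :=
  match pvCota fila dr ++ pvCota col dc with
  | [] => 0
  | x :: xs => xs.foldl min x

def pvDirMoves (fila col dr dc : Int) (un_paso : Bool) : List (Int × Int) :=
  if 0 ≤ fila + dr ∧ fila + dr < 8 ∧ 0 ≤ col + dc ∧ col + dc < 8 then
    let pasos : Int := if un_paso then 1 else pvCotasMin fila col dr dc
    (PySem.List.pyRange 1 (pasos + 1) 1).map (fun k => (fila + k * dr, col + k * dc))
  else []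

def possible_moves_general_alt (fila_inicio : Int) (columna_inicio : Int) (direcciones : List (Int × Int)) (un_paso : Bool) : List (Int × Int) :=
  direcciones.foldl
    (fun movimientos d => movimientos ++ pvDirMoves fila_inicio columna_inicio d.1 d.2 un_paso)
    []

-- ===== PRECONDITION & SPEC =====
-- Pre_ excludes exactly the inputs on which Python A never returns: a (0,0)
-- direction with the start square on the board and un_paso false makes A's
-- 'while True' loop append (fila, columna) forever (infinite loop, no value).
def Pre_possible_moves_general (fila_inicio : Int) (columna_inicio : Int) (direcciones : List (Int × Int)) (un_paso : Bool) : Prop :=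
  ¬(((0, 0) : Int × Int) ∈ direcciones ∧ un_paso = false ∧
     0 ≤ fila_inicio ∧ fila_inicio < 8 ∧ 0 ≤ columna_inicio ∧ columna_inicio < 8)
instance (fila_inicio : Int) (columna_inicio : Int) (direcciones : List (Int × Int)) (un_paso : Bool) : Decidable (Pre_possible_moves_general fila_inicio columna_inicio direcciones un_paso) := by unfold Pre_possible_moves_general; infer_instance

def pvWitness_possible_moves_general : Int × Int × (List (Int × Int)) × Bool :=
  (0, 0, [(0, 1), (1, 1), (-1, 0)], false)

def Spec_possible_moves_general (fila_inicio : Int) (columna_inicio : Int) (direcciones : List (Int × Int)) (un_paso : Bool) (out : List (Int × Int)) : Prop := out = possible_moves_general_alt fila_inicio columna_inicio direcciones un_paso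
instance (fila_inicio : Int) (columna_inicio : Int) (direcciones : List (Int × Int)) (un_paso : Bool) (out : List (Int × Int)) : Decidable (Spec_possible_moves_general fila_inicio columna_inicio direcciones un_paso out) := by unfold Spec_possible_moves_general; infer_instance

-- ===== CLAIM (what is proved, stated in full; the proofs are below) =====
def Claim_equal_possible_moves_general : Prop := ∀ (fila_inicio : Int) (columna_inicio : Int) (direcciones : List (Int × Int)) (un_paso : Bool), Dom_possible_moves_general fila_inicio columna_inicio direcciones un_paso → Pre_possible_moves_general fila_inicio columna_inicio direcciones un_paso → Spec_possible_moves_general fila_inicio columna_inicio direcciones un_paso (possible_moves_general fila_inicio columna_inicio direcciones un_paso)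

-- ===== LEMMAS AND PROOFS =====

lemma pv_floordiv_sub_one (a b : Int) (hb : 0 < b) :
    PySem.Int.floordiv (a - b) b = PySem.Int.floordiv a b - 1 := by
  have h := (PySem.Int.floordiv_eq_iff_of_pos hb (a := a) (q := PySem.Int.floordiv a b)).mp rfl
  refine (PySem.Int.floordiv_eq_iff_of_pos hb).mpr ⟨?_, ?_⟩ <;> nlinarith [h.1, h.2]

lemma pv_cap_le_iff_pos (x d k : Int) (hd : 0 < d) :
    k ≤ PySem.Int.floordiv (7 - x) d ↔ x + k * d ≤ 7 := by
  rw [PySem.Int.le_floordiv_iff_mul_le hd]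
  constructor <;> intro h <;> linarith

lemma pv_cap_le_iff_neg (x d k : Int) (hd : d < 0) :
    k ≤ PySem.Int.floordiv x (-d) ↔ 0 ≤ x + k * d := by
  rw [PySem.Int.le_floordiv_iff_mul_le (by omega : (0:Int) < -d)]
  constructor <;> intro h <;> linarith

lemma pv_cap_lt_9_pos (x d : Int) (hd : 0 < d) (h : 0 ≤ x + d) :
    PySem.Int.floordiv (7 - x) d < 9 := by
  rw [PySem.Int.floordiv_lt_iff_lt_mul hd]; linarith

lemma pv_cap_lt_9_neg (x d : Int) (hd : d < 0) (h : x + d ≤ 7) :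
    PySem.Int.floordiv x (-d) < 9 := by
  rw [PySem.Int.floordiv_lt_iff_lt_mul (by omega : (0:Int) < -d)]; linarith

-- out of board next step => the loop stops, any fuel
lemma pv_loop_nil (dr dc : Int) (up : Bool) (r c : Int) (fuel : Nat)
    (h : ¬(0 ≤ r + dr ∧ r + dr < 8 ∧ 0 ≤ c + dc ∧ c + dc < 8)) :
    pvLoopA dr dc up r c fuel = [] := by
  cases fuel with
  | zero => rfl
  | succ n => simp only [pvLoopA]; rw [if_neg h]

lemma pv_range_shift {α : Type} (s : Int) (g : Int → α) :
    (PySem.List.pyRange 2 (s + 1) 1).map g = (PySem.List.pyRange 1 s 1).map (fun k => g (k + 1)) := by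
  rw [PySem.List.pyRange_one, PySem.List.pyRange_one, List.map_map, List.map_map]
  have h : (s + 1 - 2).toNat = (s - 1).toNat := by omega
  rw [h]
  refine List.map_congr_left ?_
  intro k _
  show g (2 + (k : Int)) = g ((1 + (k : Int)) + 1)
  congr 1
  omega

-- loop = range-comprehension, abstractly over a step-count function S
lemma pv_loop_eq_range (dr dc : Int) (S : Int → Int → Int)
    (hshift : ∀ r c, S (r + dr) (c + dc) = S r c - 1)
    (hpos : ∀ r c, (0 ≤ r + dr ∧ r + dr < 8 ∧ 0 ≤ c + dc ∧ c + dc < 8) → 1 ≤ S r c)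
    (hnext : ∀ r c, (0 ≤ r + dr ∧ r + dr < 8 ∧ 0 ≤ c + dc ∧ c + dc < 8) →
       ((0 ≤ r + 2 * dr ∧ r + 2 * dr < 8 ∧ 0 ≤ c + 2 * dc ∧ c + 2 * dc < 8) ↔ 2 ≤ S r c)) :
    ∀ (fuel : Nat) (r c : Int), (0 ≤ r + dr ∧ r + dr < 8 ∧ 0 ≤ c + dc ∧ c + dc < 8) →
      (S r c).toNat ≤ fuel →
      pvLoopA dr dc false r c fuel =
        (PySem.List.pyRange 1 (S r c + 1) 1).map (fun k => (r + k * dr, c + k * dc)) := by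
  intro fuel
  induction fuel with
  | zero =>
    intro r c hin hf
    have := hpos r c hin
    omega
  | succ n ih =>
    intro r c hin hf
    simp only [pvLoopA]
    rw [if_pos hin]
    simp only [Bool.false_eq_true, if_false]
    by_cases h2 : 2 ≤ S r c
    · have hin2 : 0 ≤ (r + dr) + dr ∧ (r + dr) + dr < 8 ∧ 0 ≤ (c + dc) + dc ∧ (c + dc) + dc < 8 := by
        have := (hnext r c hin).mpr h2
        omega
      have hfn : (S (r + dr) (c + dc)).toNat ≤ n := by
        have := hshift r c
        omega
      rw [ih (r + dr) (c + dc) hin2 hfn, hshift r c]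
      rw [PySem.List.pyRange_one_cons (show (1:Int) < S r c + 1 by omega)]
      have h21 : S r c - 1 + 1 = S r c := by ring
      rw [h21, List.map_cons]
      rw [show (1:Int) + 1 = 2 from rfl, pv_range_shift (S r c)]
      refine List.cons_eq_cons.mpr ⟨by norm_num, ?_⟩
      refine List.map_congr_left ?_
      intro k _
      refine Prod.ext ?_ ?_ <;> simp <;> ring
    · have h1 : S r c = 1 := by have := hpos r c hin; omega
      have hstop : ¬(0 ≤ (r + dr) + dr ∧ (r + dr) + dr < 8 ∧ 0 ≤ (c + dc) + dc ∧ (c + dc) + dc < 8) := by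
        intro hh
        have : 0 ≤ r + 2 * dr ∧ r + 2 * dr < 8 ∧ 0 ≤ c + 2 * dc ∧ c + 2 * dc < 8 := by omega
        have := (hnext r c hin).mp this
        omega
      rw [pv_loop_nil dr dc false (r + dr) (c + dc) n hstop, h1,
        PySem.List.pyRange_one_singleton]
      simp

-- per-axis closed-form step cap (used with d ≠ 0)
def pvCap (x d : Int) : Int :=
  if 0 < d then PySem.Int.floordiv (7 - x) d else PySem.Int.floordiv x (-d)

lemma pvCap_shift (x d : Int) (hd : d ≠ 0) : pvCap (x + d) d = pvCap x d - 1 := by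
  unfold pvCap
  split_ifs with hp
  · have h : 7 - (x + d) = (7 - x) - d := by ring
    rw [h, pv_floordiv_sub_one _ _ hp]
  · have hn : (0:Int) < -d := by omega
    have h : x + d = x - (-d) := by ring
    rw [h, pv_floordiv_sub_one _ _ hn]

lemma pvCap_k_iff (x d k : Int) (hd : d ≠ 0) (h0 : 0 ≤ x + d) (h7 : x + d < 8) (hk : 1 ≤ k) :
    (0 ≤ x + k * d ∧ x + k * d < 8) ↔ k ≤ pvCap x d := by
  unfold pvCap
  split_ifs with hp
  · rw [pv_cap_le_iff_pos x d k hp]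
    constructor
    · rintro ⟨_, hb⟩; omega
    · intro hb
      have hmono : x + d ≤ x + k * d := by nlinarith
      exact ⟨by omega, by omega⟩
  · have hn : d < 0 := by omega
    rw [pv_cap_le_iff_neg x d k hn]
    constructor
    · rintro ⟨ha, _⟩; exact ha
    · intro ha
      have hmono : x + k * d ≤ x + d := by nlinarith
      exact ⟨ha, by omega⟩

lemma pvCap_pos (x d : Int) (hd : d ≠ 0) (h0 : 0 ≤ x + d) (h7 : x + d < 8) : 1 ≤ pvCap x d := by
  have h := pvCap_k_iff x d 1 hd h0 h7 le_rfl
  rw [one_mul] at h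
  exact h.mp ⟨h0, h7⟩

lemma pvCap_lt9 (x d : Int) (hd : d ≠ 0) (h0 : 0 ≤ x + d) (h7 : x + d < 8) : pvCap x d < 9 := by
  unfold pvCap
  split_ifs with hp
  · exact pv_cap_lt_9_pos x d hp h0
  · exact pv_cap_lt_9_neg x d (by omega) (by omega)

-- pvCotasMin in terms of pvCap, per shape of the direction
lemma pv_cotas_left (r c dr dc : Int) (h1 : dr ≠ 0) (h2 : dc = 0) :
    pvCotasMin r c dr dc = pvCap r dr := by
  subst h2
  unfold pvCotasMin pvCota pvCap
  rcases lt_or_gt_of_ne h1 with h | h <;>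
    simp [h, not_lt.mpr (le_of_lt h), List.foldl]

lemma pv_cotas_right (r c dr dc : Int) (h1 : dr = 0) (h2 : dc ≠ 0) :
    pvCotasMin r c dr dc = pvCap c dc := by
  subst h1
  unfold pvCotasMin pvCota pvCap
  rcases lt_or_gt_of_ne h2 with h | h <;>
    simp [h, not_lt.mpr (le_of_lt h), List.foldl]

lemma pv_cotas_both (r c dr dc : Int) (h1 : dr ≠ 0) (h2 : dc ≠ 0) :
    pvCotasMin r c dr dc = min (pvCap r dr) (pvCap c dc) := by
  unfold pvCotasMin pvCota pvCap
  rcases lt_or_gt_of_ne h1 with ha | ha <;> rcases lt_or_gt_of_ne h2 with hb | hb <;>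
    simp [ha, hb, not_lt.mpr (le_of_lt ha), not_lt.mpr (le_of_lt hb), List.foldl]

lemma pv_dir_eq (f c dr dc : Int) (up : Bool)
    (h : ¬(dr = 0 ∧ dc = 0 ∧ up = false ∧ 0 ≤ f ∧ f < 8 ∧ 0 ≤ c ∧ c < 8)) :
    pvLoopA dr dc up f c 16 = pvDirMoves f c dr dc up := by
  by_cases hin : 0 ≤ f + dr ∧ f + dr < 8 ∧ 0 ≤ c + dc ∧ c + dc < 8
  · cases up with
    | true =>
      unfold pvDirMoves
      rw [if_pos hin]
      simp only [if_true]
      show pvLoopA dr dc true f c 16 = _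
      simp only [pvLoopA]
      rw [if_pos hin]
      rw [show (1:Int) + 1 = 1 + 1 from rfl, PySem.List.pyRange_one_singleton]
      simp
    | false =>
      have hnz : ¬(dr = 0 ∧ dc = 0) := by
        rintro ⟨rfl, rfl⟩
        exact h ⟨rfl, rfl, rfl, by omega, by omega, by omega, by omega⟩
      unfold pvDirMoves
      rw [if_pos hin]
      simp only [Bool.false_eq_true, if_false]
      by_cases hdr : dr = 0
      · have hdc : dc ≠ 0 := fun hh => hnz ⟨hdr, hh⟩
        subst hdr
        rw [pv_cotas_right f c 0 dc rfl hdc]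
        refine pv_loop_eq_range 0 dc (fun _ c' => pvCap c' dc) ?_ ?_ ?_ 16 f c hin ?_
        · beta_reduce; intro r' c'; exact pvCap_shift c' dc hdc
        · beta_reduce; rintro r' c' ⟨_, _, hb0, hb7⟩; exact pvCap_pos c' dc hdc hb0 hb7
        · beta_reduce
          rintro r' c' ⟨_, _, hb0, hb7⟩
          have hiff := pvCap_k_iff c' dc 2 hdc hb0 hb7 (by norm_num)
          constructor
          · rintro ⟨_, _, hx, hy⟩; exact hiff.mp ⟨hx, hy⟩
          · intro hk
            have := hiff.mpr hk
            omega
        · beta_reduce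
          have := pvCap_lt9 c dc hdc (by omega) (by omega)
          omega
      · by_cases hdc : dc = 0
        · subst hdc
          rw [pv_cotas_left f c dr 0 hdr rfl]
          refine pv_loop_eq_range dr 0 (fun r' _ => pvCap r' dr) ?_ ?_ ?_ 16 f c hin ?_
          · beta_reduce; intro r' c'; exact pvCap_shift r' dr hdr
          · beta_reduce; rintro r' c' ⟨hb0, hb7, _, _⟩; exact pvCap_pos r' dr hdr hb0 hb7
          · beta_reduce
            rintro r' c' ⟨hb0, hb7, _, _⟩
            have hiff := pvCap_k_iff r' dr 2 hdr hb0 hb7 (by norm_num)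
            constructor
            · rintro ⟨hx, hy, _, _⟩; exact hiff.mp ⟨hx, hy⟩
            · intro hk
              have := hiff.mpr hk
              omega
          · beta_reduce
            have := pvCap_lt9 f dr hdr (by omega) (by omega)
            omega
        · rw [pv_cotas_both f c dr dc hdr hdc]
          refine pv_loop_eq_range dr dc (fun r' c' => min (pvCap r' dr) (pvCap c' dc)) ?_ ?_ ?_ 16 f c hin ?_
          · beta_reduce
            intro r' c'
            have h1 := pvCap_shift r' dr hdr
            have h2 := pvCap_shift c' dc hdc
            omega
          · beta_reduce
            rintro r' c' ⟨ha0, ha7, hb0, hb7⟩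
            have h1 := pvCap_pos r' dr hdr ha0 ha7
            have h2 := pvCap_pos c' dc hdc hb0 hb7
            omega
          · beta_reduce
            rintro r' c' ⟨ha0, ha7, hb0, hb7⟩
            have h1 := pvCap_k_iff r' dr 2 hdr ha0 ha7 (by norm_num)
            have h2 := pvCap_k_iff c' dc 2 hdc hb0 hb7 (by norm_num)
            constructor
            · rintro ⟨hx, hy, hz, hw⟩
              have := h1.mp ⟨hx, hy⟩
              have := h2.mp ⟨hz, hw⟩
              omega
            · intro hk
              have ha := h1.mpr (by omega)
              have hb := h2.mpr (by omega)
              omega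
          · beta_reduce
            have h1 := pvCap_lt9 f dr hdr (by omega) (by omega)
            have h2 := pvCap_lt9 c dc hdc (by omega) (by omega)
            omega
  · rw [pv_loop_nil dr dc up f c 16 hin]
    unfold pvDirMoves
    rw [if_neg hin]

-- ===== VERDICT (by name: the statement is the Claim_ definition above) =====
theorem possible_moves_general_spec : Claim_equal_possible_moves_general := by
  intro f c dirs up _ hpre
  unfold Spec_possible_moves_general possible_moves_general possible_moves_general_alt
  apply PySem.List.foldl_congr_mem
  intro acc d hd
  congr 1
  refine pv_dir_eq f c d.1 d.2 up ?_
  rintro ⟨h1, h2, h3, h4⟩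
  exact hpre ⟨by rcases d with ⟨a, b⟩; simp at h1 h2; simp [h1, h2] at hd ⊢; exact hd, h3, h4⟩
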